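-- pv_equiv track=rewrite | github.com/MrBrantCode/unitest_baseline | mut_generate/mist_train_cf/cf_19882/solution.py | sort_strings_by_vowels
-- ===== SOURCE A (Python) =====
-- def sort_strings_by_vowels(strings):
--     """
--     Sorts an array of strings in descending order of the number of vowels present in each string.
--     If two strings have the same number of vowels, they are sorted alphabetically.
--
--     Args:
--         strings (list): A list of strings.
--
--     Returns:
--         list: The sorted list of strings.
--     """
--     def count_vowels(string):
--         """Counts the number of vowels in a string."""
--         vowels = 'aeiouAEIOU'
--         count = 0
--         for char in string:
--             if char in vowels:
--                 count += 1
--         return count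
--
--     # Sort the array based on the number of vowels, followed by alphabetical order
--     return sorted(strings, key=lambda x: (-count_vowels(x), x))
-- ===== SOURCE B (Python) =====
-- def sort_strings_by_vowels(strings):
--     # Bucket (distribution) approach: group strings by vowel count, then emit
--     # the groups from the highest count down, each group sorted alphabetically.
--     vowels = set('aeiouAEIOU')
--     counts = [sum(ch in vowels for ch in s) for s in strings]
--     result = []
--     for c in range(max(counts, default=-1), -1, -1):
--         result += sorted(s for s, k in zip(strings, counts) if k == c)
--     return result
-- ===== Notes on version B (the rewrite author's own statement) =====
-- stated objective: alternative
-- what changed: Replaces the single comparison sort with the composite key (-count_vowels(x), x) by a distribution (bucket) scheme: precompute each string's vowel count, then for each possible count from the maximum down to 0 collect the strings with that count and sort just that group alphabetically.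
import Mathlib
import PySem

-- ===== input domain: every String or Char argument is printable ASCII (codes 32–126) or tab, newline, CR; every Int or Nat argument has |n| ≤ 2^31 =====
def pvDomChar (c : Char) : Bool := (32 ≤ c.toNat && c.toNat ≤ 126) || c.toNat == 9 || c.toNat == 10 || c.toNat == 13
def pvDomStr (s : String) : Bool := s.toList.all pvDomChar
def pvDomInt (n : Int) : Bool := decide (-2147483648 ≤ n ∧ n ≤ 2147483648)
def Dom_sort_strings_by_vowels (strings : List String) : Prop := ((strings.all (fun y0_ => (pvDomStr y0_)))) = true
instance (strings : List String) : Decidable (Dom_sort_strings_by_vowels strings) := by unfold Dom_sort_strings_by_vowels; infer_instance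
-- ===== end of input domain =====

-- B replaces A's single comparison sort with the composite key (-count_vowels(x), x) by a
-- distribution (bucket) scheme: group strings by vowel count, sort each group alphabetically,
-- emit groups from the highest count down; same result, no speed claim.

-- ===== PORT A =====
def pvCountVowels (string : String) : Int :=
  string.toList.foldl (fun count char => if "aeiouAEIOU".toList.contains char then count + 1 else count) 0

def sort_strings_by_vowels (strings : List String) : List String :=
  PySem.List.sorted2 strings (fun x => -(pvCountVowels x)) (fun x => x) false

-- ===== PORT B =====
def pvVowelSet : List Char := PySem.Set.ofList "aeiouAEIOU".toList

def pvCountVowelsAlt (s : String) : Int :=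
  (s.toList.map (fun ch => if pvVowelSet.contains ch then (1 : Int) else 0)).sum

def sort_strings_by_vowels_alt (strings : List String) : List String :=
  let counts := strings.map pvCountVowelsAlt
  (PySem.List.pyRange (PySem.List.maxD counts (fun x => x) (-1)) (-1) (-1)).foldl
    (fun result c =>
      result ++ PySem.List.sorted
        (((strings.zip counts).filter (fun p => p.2 == c)).map (fun p => p.1))
        (fun x => x) false)
    []

-- ===== PRECONDITION & SPEC =====
def Spec_sort_strings_by_vowels (strings : List String) (out : List String) : Prop := out = sort_strings_by_vowels_alt strings
instance (strings : List String) (out : List String) : Decidable (Spec_sort_strings_by_vowels strings out) := by unfold Spec_sort_strings_by_vowels; infer_instance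

-- ===== CLAIM (what is proved, stated in full; the proofs are below) =====
def Claim_equal_sort_strings_by_vowels : Prop := ∀ (strings : List String), Dom_sort_strings_by_vowels strings → Spec_sort_strings_by_vowels strings (sort_strings_by_vowels strings)

-- ===== LEMMAS AND PROOFS =====

-- The lexicographic key (-vowel count, string) that A sorts by; both results are Pairwise ≤ under it.
def pvK (x : String) : Int ×ₗ String := toLex (-(pvCountVowels x), x)

theorem pvK_le_iff (a b : String) :
    pvK a ≤ pvK b ↔ pvCountVowels b < pvCountVowels a ∨ (pvCountVowels a = pvCountVowels b ∧ a ≤ b) := by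
  simp [pvK, Prod.Lex.toLex_le_toLex]

theorem pvK_lt_iff (a b : String) :
    pvK a < pvK b ↔ pvCountVowels b < pvCountVowels a ∨ (pvCountVowels a = pvCountVowels b ∧ a < b) := by
  simp [pvK, Prod.Lex.toLex_lt_toLex]

theorem pvK_inj : Function.Injective pvK := by
  intro a b h
  have := congrArg (fun p => (ofLex p).2) h
  simpa [pvK] using this

theorem pv_cv_eq : pvCountVowelsAlt = pvCountVowels := by
  funext s
  unfold pvCountVowelsAlt pvCountVowels
  rw [PySem.List.foldl_if_add_one, PySem.List.sum_map_ite_one_zero]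
  have : pvVowelSet = "aeiouAEIOU".toList := by decide
  simp [this]

theorem pv_cv_nonneg (s : String) : 0 ≤ pvCountVowels s := by
  unfold pvCountVowels
  rw [PySem.List.foldl_if_add_one]
  positivity

-- inserting into a pvK-sorted list with strict-pvK comparison keeps it pvK-sorted (A's side)
theorem pv_insertA (x : String) (acc : List String)
    (h : acc.Pairwise (fun a b => pvK a ≤ pvK b)) :
    (PySem.List.insertBy (fun a b => decide (pvK a < pvK b)) x acc).Pairwise (fun a b => pvK a ≤ pvK b) := by
  induction acc with
  | nil => simp [PySem.List.insertBy]
  | cons y tl ih =>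
    rcases List.pairwise_cons.mp h with ⟨hy, htl⟩
    by_cases hxy : pvK x < pvK y
    · simp only [PySem.List.insertBy, hxy, decide_true]
      refine List.pairwise_cons.mpr ⟨?_, h⟩
      intro z hz
      rcases List.mem_cons.mp hz with hz | hz
      · subst hz; exact le_of_lt hxy
      · exact le_trans (le_of_lt hxy) (hy z hz)
    · simp only [PySem.List.insertBy, hxy, decide_false, Bool.false_eq_true]
      refine List.pairwise_cons.mpr ⟨?_, ih htl⟩
      intro z hz
      rcases (PySem.List.mem_insertBy _ _ _ _).mp hz with hz | hz
      · subst hz; exact le_of_not_gt hxy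
      · exact hy z hz

theorem pv_foldlA (ys : List String) (acc : List String)
    (h : acc.Pairwise (fun a b => pvK a ≤ pvK b)) :
    (ys.foldl (fun acc x => PySem.List.insertBy (fun a b => decide (pvK a < pvK b)) x acc) acc).Pairwise
      (fun a b => pvK a ≤ pvK b) := by
  induction ys generalizing acc with
  | nil => exact h
  | cons x ys ih => exact ih _ (pv_insertA x acc h)

theorem pv_A_pairwise (strings : List String) :
    (sort_strings_by_vowels strings).Pairwise (fun a b => pvK a ≤ pvK b) := by
  have hb : (fun a b : String =>
      (decide (-(pvCountVowels a) < -(pvCountVowels b)) ||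
        (!decide (-(pvCountVowels b) < -(pvCountVowels a)) && decide (a < b)))) =
      (fun a b => decide (pvK a < pvK b)) := by
    funext a b
    by_cases h1 : (-(pvCountVowels a) : Int) < -(pvCountVowels b) <;>
      by_cases h2 : (-(pvCountVowels b) : Int) < -(pvCountVowels a) <;>
      by_cases h3 : a < b <;>
      simp [h1, h2, h3, pvK_lt_iff] <;> omega
  have : sort_strings_by_vowels strings =
      strings.foldl (fun acc x => PySem.List.insertBy (fun a b => decide (pvK a < pvK b)) x acc) [] := by
    unfold sort_strings_by_vowels PySem.List.sorted2
    simp only [if_neg (by decide : ¬ (false = true))]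
    rw [hb]
  rw [this]
  exact pv_foldlA strings [] List.Pairwise.nil

-- B's zip-with-its-own-map-and-project pattern is a plain filter of the original list.
theorem pv_zip_filter (l : List String) (f : String → Int) (c : Int) :
    (((l.zip (l.map f)).filter (fun p => p.2 == c)).map (fun p => p.1)) =
      l.filter (fun s => f s == c) := by
  induction l with
  | nil => rfl
  | cons x t ih =>
    by_cases h : f x == c <;> simp [h, ih]

-- distributing l over a duplicate-free list of keys covering all its key values is a permutation
theorem pv_flatMap_filter_perm (ks : List Int) (l : List String) (f : String → Int)
    (hnd : ks.Nodup) (hmem : ∀ x ∈ l, f x ∈ ks) :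
    (ks.flatMap (fun c => l.filter (fun x => f x == c))).Perm l := by
  induction ks generalizing l with
  | nil =>
    have : l = [] := by
      cases l with
      | nil => rfl
      | cons x t => exact absurd (hmem x (List.mem_cons_self)) (by simp)
    simp [this]
  | cons c ks ih =>
    rcases List.nodup_cons.mp hnd with ⟨hc, hnd'⟩
    have hrw : ks.flatMap (fun c' => l.filter (fun x => f x == c')) =
        ks.flatMap (fun c' => (l.filter (fun x => !(f x == c))).filter (fun x => f x == c')) := by
      apply List.flatMap_congr
      intro c' hc'
      rw [List.filter_filter]
      apply List.filter_congr
      intro x _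
      have hne : ¬ c' = c := fun e => hc (e ▸ hc')
      by_cases h : f x = c'
      · simp [h, hne]
      · simp [h]
    have hperm' : (ks.flatMap (fun c' => (l.filter (fun x => !(f x == c))).filter (fun x => f x == c'))).Perm
        (l.filter (fun x => !(f x == c))) := by
      refine ih _ hnd' ?_
      intro x hx
      rcases List.mem_filter.mp hx with ⟨hxl, hxc⟩
      rcases List.mem_cons.mp (hmem x hxl) with h | h
      · simp [h] at hxc
      · exact h
    rw [List.flatMap_cons, hrw]
    exact (List.Perm.append_left _ hperm').trans (List.filter_append_perm _ l)

-- flatMap respects pointwise permutations of the blocks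
theorem pv_flatMap_perm (ks : List Int) (g h : Int → List String)
    (hp : ∀ c ∈ ks, (g c).Perm (h c)) : (ks.flatMap g).Perm (ks.flatMap h) := by
  induction ks with
  | nil => rfl
  | cons c ks ih =>
    simp only [List.flatMap_cons]
    exact (hp c List.mem_cons_self).append
      (ih (fun c' hc' => hp c' (List.mem_cons_of_mem _ hc')))

-- B unfolded: a flatMap of alphabetically sorted per-count groups over the descending count range
theorem pv_B_eq_flatMap (strings : List String) :
    sort_strings_by_vowels_alt strings =
      (PySem.List.pyRange (PySem.List.maxD (strings.map pvCountVowels) (fun x => x) (-1)) (-1) (-1)).flatMap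
        (fun c => PySem.List.sorted (strings.filter (fun s => pvCountVowels s == c)) (fun x => x) false) := by
  unfold sort_strings_by_vowels_alt
  rw [pv_cv_eq, PySem.List.foldl_append_eq_flatMap]
  simp only [List.nil_append]
  congr 1
  funext c
  rw [pv_zip_filter]

theorem pv_R_pairwise_gt (m : Int) :
    (PySem.List.pyRange m (-1) (-1)).Pairwise (fun a b => b < a) := by
  rw [PySem.List.pyRange_neg_one_eq_reverse]
  rw [List.pairwise_reverse]
  exact PySem.List.pairwise_lt_pyRange_one (-1 + 1) (m + 1)

theorem pv_B_perm (strings : List String) :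
    (sort_strings_by_vowels_alt strings).Perm strings := by
  rw [pv_B_eq_flatMap]
  set m := PySem.List.maxD (strings.map pvCountVowels) (fun x => x) (-1) with hm
  have h1 : ∀ c ∈ PySem.List.pyRange m (-1) (-1),
      (PySem.List.sorted (strings.filter (fun s => pvCountVowels s == c)) (fun x => x) false).Perm
        (strings.filter (fun s => pvCountVowels s == c)) :=
    fun c _ => PySem.List.sorted_perm _ _ _
  refine (pv_flatMap_perm _ _ _ h1).trans ?_
  apply pv_flatMap_filter_perm
  · exact List.Pairwise.imp (fun h => ne_of_gt h) (pv_R_pairwise_gt m)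
  · intro x hx
    rw [PySem.List.mem_pyRange_neg_one]
    constructor
    · have := pv_cv_nonneg x; omega
    · have hne : strings.map pvCountVowels ≠ [] := by
        intro h; simp at h; subst h; simp at hx
      exact PySem.List.le_key_maxD (strings.map pvCountVowels) (fun x => x) (-1) hne
        (pvCountVowels x) (List.mem_map_of_mem hx)

theorem pv_blocks_pairwise (strings : List String) (ks : List Int)
    (hks : ks.Pairwise (fun a b => b < a)) :
    (ks.flatMap
        (fun c => PySem.List.sorted (strings.filter (fun s => pvCountVowels s == c)) (fun x => x) false)).Pairwise
      (fun a b => pvK a ≤ pvK b) := by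
  induction hks with
  | nil => simp
  | @cons c ks hc hks' ih =>
    simp only [List.flatMap_cons]
    rw [List.pairwise_append]
    refine ⟨?_, ih, ?_⟩
    · -- within the group for count c: equal counts and alphabetical order
      refine (PySem.List.sorted_pairwise _ _).imp_of_mem ?_
      intro a b ha hb hab
      have ha' : pvCountVowels a = c := by
        have := (List.mem_filter.mp ((PySem.List.mem_sorted _ _ _ _).mp ha)).2
        simpa using this
      have hb' : pvCountVowels b = c := by
        have := (List.mem_filter.mp ((PySem.List.mem_sorted _ _ _ _).mp hb)).2
        simpa using this
      exact (pvK_le_iff a b).mpr (Or.inr ⟨ha'.trans hb'.symm, hab⟩)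
    · -- across groups: the earlier group has the strictly larger count
      intro a ha b hb
      have ha' : pvCountVowels a = c := by
        have := (List.mem_filter.mp ((PySem.List.mem_sorted _ _ _ _).mp ha)).2
        simpa using this
      have hd : ∃ d ∈ ks, pvCountVowels b = d := by
        rcases List.mem_flatMap.mp hb with ⟨d, hd, hbd⟩
        refine ⟨d, hd, ?_⟩
        have := (List.mem_filter.mp ((PySem.List.mem_sorted _ _ _ _).mp hbd)).2
        simpa using this
      rcases hd with ⟨d, hdk, hb'⟩
      have : d < c := hc d hdk
      exact (pvK_le_iff a b).mpr (Or.inl (by omega))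

theorem pv_B_pairwise (strings : List String) :
    (sort_strings_by_vowels_alt strings).Pairwise (fun a b => pvK a ≤ pvK b) := by
  rw [pv_B_eq_flatMap]
  exact pv_blocks_pairwise strings _ (pv_R_pairwise_gt _)

-- ===== VERDICT (by name: the statement is the Claim_ definition above) =====
theorem sort_strings_by_vowels_spec : Claim_equal_sort_strings_by_vowels := by
  intro strings _
  unfold Spec_sort_strings_by_vowels
  have hpa : (sort_strings_by_vowels strings).Perm strings :=
    PySem.List.sorted2_perm strings _ _ false
  exact PySem.List.eq_of_perm_of_pairwise_le_of_injective pvK pvK_inj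
    (hpa.trans (pv_B_perm strings).symm) (pv_A_pairwise strings) (pv_B_pairwise strings)
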